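-- pv_equiv track=rewrite | github.com/kf5grd/pasvortilo | pasvortilo.py | genpw
-- ===== SOURCE A (Python) =====
-- def genpw(md5_string, length, punct_mark):
--     i=0
--     uc_count=0
--     pwbuff=''
--     for c in md5_string:
--         if i == length:
--             pwbuff = pwbuff + punct_mark
--             i+=1
--             uc_count=0
--         elif i == (length*2)+1:
--             break
--         else:
--             if c.isalpha() == True and uc_count == 0:
--                 c = c.upper()
--                 uc_count=1
--             pwbuff = pwbuff + c
--             i+=1
--     return pwbuff
-- ===== SOURCE B (Python) =====
-- def _upfirst(s):
--     # uppercase the first alphabetic character of s (no-op if none)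
--     if not s:
--         return s
--     if s[0].isalpha():
--         return s[0].upper() + s[1:]
--     return s[0] + _upfirst(s[1:])
--
--
-- def genpw(md5_string, length, punct_mark):
--     if length < 0 or len(md5_string) <= length:
--         return _upfirst(md5_string)
--     seg1 = md5_string[:length]
--     seg2 = md5_string[length + 1:2 * length + 1]
--     return _upfirst(seg1) + punct_mark + _upfirst(seg2)
-- ===== Notes on version B (the rewrite author's own statement) =====
-- stated objective: faster
-- what changed: Replaces A's single stateful loop (counter i, uc_count flag, break, skipped char, char-by-char string concatenation) by two slices of the input plus a tiny recursive helper that uppercases the first alphabetic character; the punct is inserted iff 0 <= length < len(md5_string), which is exactly when A's loop reaches i == length.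
import Mathlib
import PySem

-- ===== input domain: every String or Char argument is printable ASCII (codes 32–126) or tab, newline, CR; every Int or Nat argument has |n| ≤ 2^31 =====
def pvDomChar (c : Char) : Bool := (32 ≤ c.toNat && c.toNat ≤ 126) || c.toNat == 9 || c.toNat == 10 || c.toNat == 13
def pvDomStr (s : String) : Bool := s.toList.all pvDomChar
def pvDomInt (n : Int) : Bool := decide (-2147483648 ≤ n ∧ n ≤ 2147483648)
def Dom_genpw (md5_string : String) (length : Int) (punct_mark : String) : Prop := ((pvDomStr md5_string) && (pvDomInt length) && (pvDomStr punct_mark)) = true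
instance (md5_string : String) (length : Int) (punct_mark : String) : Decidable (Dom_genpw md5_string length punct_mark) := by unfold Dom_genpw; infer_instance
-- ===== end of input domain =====

-- B replaces A's stateful loop by two slices and a recursive first-alpha-uppercase helper (objective: simpler).

-- ===== PORT A =====
-- the for-loop of A: state (i, uc_count, pwbuff), early 'break' = returning pwbuff
def genpwLoopA (length : Int) (punct : List Char) (cs : List Char) (i uc_count : Int) (pwbuff : List Char) : List Char :=
  match cs with
  | [] => pwbuff
  | c :: rest =>
    if i = length then
      genpwLoopA length punct rest (i + 1) 0 (pwbuff ++ punct)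
    else if i = length * 2 + 1 then
      pwbuff
    else if PySem.Chars.isalpha c && (uc_count == 0) then
      genpwLoopA length punct rest (i + 1) 1 (pwbuff ++ [PySem.Chars.upperChar c])
    else
      genpwLoopA length punct rest (i + 1) uc_count (pwbuff ++ [c])

def genpw (md5_string : String) (length : Int) (punct_mark : String) : String :=
  String.mk (genpwLoopA length punct_mark.toList md5_string.toList 0 0 [])

-- ===== PORT B =====
-- Source B's _upfirst: s[0].upper() + s[1:] at the first alphabetic char, recursing otherwise
def upfirstB (cs : List Char) : List Char :=
  match cs with
  | [] => cs
  | c :: rest =>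
    if PySem.Chars.isalpha c then PySem.Chars.upperChar c :: rest
    else c :: upfirstB rest

def genpw_alt (md5_string : String) (length : Int) (punct_mark : String) : String :=
  let cs := md5_string.toList
  if length < 0 || (cs.length : Int) ≤ length then
    String.mk (upfirstB cs)
  else
    String.mk (upfirstB (PySem.List.slice cs none (some length))
               ++ punct_mark.toList
               ++ upfirstB (PySem.List.slice cs (some (length + 1)) (some (2 * length + 1))))

-- ===== PRECONDITION & SPEC =====
def Spec_genpw (md5_string : String) (length : Int) (punct_mark : String) (out : String) : Prop := out = genpw_alt md5_string length punct_mark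
instance (md5_string : String) (length : Int) (punct_mark : String) (out : String) : Decidable (Spec_genpw md5_string length punct_mark out) := by unfold Spec_genpw; infer_instance

-- ===== CLAIM (what is proved, stated in full; the proofs are below) =====
def Claim_equal_genpw : Prop := ∀ (md5_string : String) (length : Int) (punct_mark : String), Dom_genpw md5_string length punct_mark → Spec_genpw md5_string length punct_mark (genpw md5_string length punct_mark)

-- ===== LEMMAS AND PROOFS =====

-- with negative length, neither i = length nor i = length*2+1 can fire: the loop upcases the first alpha (if uc = 0)
theorem genpwLoopA_neg (length : Int) (punct : List Char) (cs : List Char) :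
    ∀ (i uc : Int) (buff : List Char), length < 0 → 0 ≤ i →
      genpwLoopA length punct cs i uc buff = buff ++ (if uc = 0 then upfirstB cs else cs) := by
  induction cs with
  | nil => intro i uc buff _ _; simp [genpwLoopA, upfirstB]
  | cons c rest ih =>
    intro i uc buff hl hi
    rw [genpwLoopA]
    rw [if_neg (by omega), if_neg (by omega)]
    by_cases ha : PySem.Chars.isalpha c = true
    · by_cases hu : uc = 0
      · simp only [ha, hu, if_pos, Bool.and_self, beq_self_eq_true, if_true]
        rw [ih (i+1) 1 _ hl (by omega)]
        simp [upfirstB, ha]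
      · have : (PySem.Chars.isalpha c && (uc == 0)) = false := by simp [hu]
        rw [this, if_neg (by simp)]
        rw [ih (i+1) uc _ hl (by omega)]
        simp [hu, upfirstB]
    · have : (PySem.Chars.isalpha c && (uc == 0)) = false := by simp [ha]
      rw [this, if_neg (by simp)]
      rw [ih (i+1) uc _ hl (by omega)]
      by_cases hu : uc = 0 <;> simp [hu, upfirstB, ha]

-- past the punct insertion (length < i ≤ length*2+1): the loop is upfirst over the next (length*2+1-i) chars
theorem genpwLoopA_phase2 (length : Int) (punct : List Char) (cs : List Char) :
    ∀ (i uc : Int) (buff : List Char), length < i → i ≤ length * 2 + 1 →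
      genpwLoopA length punct cs i uc buff =
        buff ++ (if uc = 0 then upfirstB (cs.take (length * 2 + 1 - i).toNat)
                 else cs.take (length * 2 + 1 - i).toNat) := by
  induction cs with
  | nil => intro i uc buff _ _; simp [genpwLoopA, upfirstB]
  | cons c rest ih =>
    intro i uc buff hi hi2
    rw [genpwLoopA, if_neg (by omega)]
    by_cases hend : i = length * 2 + 1
    · rw [if_pos hend]
      have : (length * 2 + 1 - i).toNat = 0 := by omega
      simp [this, upfirstB]
    · rw [if_neg hend]
      have hk : (length * 2 + 1 - i).toNat = (length * 2 + 1 - (i + 1)).toNat + 1 := by omega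
      rw [hk]
      by_cases ha : PySem.Chars.isalpha c = true
      · by_cases hu : uc = 0
        · simp only [ha, hu, Bool.and_self, beq_self_eq_true, if_true]
          rw [ih (i+1) 1 _ (by omega) (by omega)]
          simp [upfirstB, ha]
        · have : (PySem.Chars.isalpha c && (uc == 0)) = false := by simp [hu]
          rw [this, if_neg (by simp)]
          rw [ih (i+1) uc _ (by omega) (by omega)]
          simp [hu, upfirstB]
      · have : (PySem.Chars.isalpha c && (uc == 0)) = false := by simp [ha]
        rw [this, if_neg (by simp)]
        rw [ih (i+1) uc _ (by omega) (by omega)]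
        by_cases hu : uc = 0 <;> simp [hu, upfirstB, ha]

-- before the punct insertion (0 ≤ i ≤ length): upfirst over the next (length-i) chars, then punct + phase 2 if we get there
theorem genpwLoopA_phase1 (length : Int) (punct : List Char) (cs : List Char) :
    ∀ (i uc : Int) (buff : List Char), 0 ≤ i → i ≤ length →
      genpwLoopA length punct cs i uc buff =
        buff ++ (if uc = 0 then upfirstB (cs.take (length - i).toNat)
                 else cs.take (length - i).toNat)
             ++ (if (length - i).toNat < cs.length then
                   punct ++ upfirstB ((cs.drop ((length - i).toNat + 1)).take length.toNat)
                 else []) := by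
  induction cs with
  | nil =>
    intro i uc buff _ _
    simp [genpwLoopA, upfirstB]
  | cons c rest ih =>
    intro i uc buff hi hi2
    rw [genpwLoopA]
    by_cases hpunct : i = length
    · rw [if_pos hpunct]
      subst hpunct
      rw [genpwLoopA_phase2 i punct rest (i+1) 0 _ (by omega) (by omega)]
      have h2 : i * 2 + 1 - (i + 1) = i := by omega
      rw [h2]
      simp [upfirstB]
    · rw [if_neg hpunct, if_neg (by omega)]
      have hm : (length - i).toNat = (length - (i + 1)).toNat + 1 := by omega
      rw [hm]
      have hlen : ((length - (i+1)).toNat + 1 < (c :: rest).length) ↔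
          ((length - (i+1)).toNat < rest.length) := by simp
      by_cases ha : PySem.Chars.isalpha c = true
      · by_cases hu : uc = 0
        · simp only [ha, hu, Bool.and_self, beq_self_eq_true, if_true]
          rw [ih (i+1) 1 _ (by omega) (by omega)]
          simp [upfirstB, ha, hlen]
        · have : (PySem.Chars.isalpha c && (uc == 0)) = false := by simp [hu]
          rw [this, if_neg (by simp)]
          rw [ih (i+1) uc _ (by omega) (by omega)]
          simp [hu, upfirstB, hlen]
      · have : (PySem.Chars.isalpha c && (uc == 0)) = false := by simp [ha]
        rw [this, if_neg (by simp)]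
        rw [ih (i+1) uc _ (by omega) (by omega)]
        by_cases hu : uc = 0 <;> simp [hu, upfirstB, ha, hlen]

-- ===== VERDICT (by name: the statement is the Claim_ definition above) =====
theorem genpw_spec : Claim_equal_genpw := by
  intro md5_string length punct_mark _
  unfold Spec_genpw genpw genpw_alt
  set cs := md5_string.toList with hcs
  by_cases hneg : length < 0
  · rw [genpwLoopA_neg length punct_mark.toList cs 0 0 [] hneg le_rfl]
    simp [hneg]
  · push_neg at hneg
    rw [genpwLoopA_phase1 length punct_mark.toList cs 0 0 [] le_rfl (by omega)]
    have h0 : (length - 0).toNat = length.toNat := by omega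
    by_cases hle : (cs.length : Int) ≤ length
    · have hbig : ¬ length.toNat < cs.length := by omega
      have htake : cs.take length.toNat = cs := List.take_of_length_le (by omega)
      simp [h0, hbig, htake, hneg, hle, not_lt.mpr hneg]
    · have hsmall : length.toNat < cs.length := by omega
      have hB1 : PySem.List.slice cs none (some length) = cs.take length.toNat :=
        PySem.List.slice_to cs hneg
      have hB2 : PySem.List.slice cs (some (length + 1)) (some (2 * length + 1)) =
          (cs.drop (length + 1).toNat).take ((2 * length + 1).toNat - (length + 1).toNat) :=
        PySem.List.slice_toNat cs (by omega) (by omega)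
      have hn1 : (length + 1).toNat = length.toNat + 1 := by omega
      have hn2 : (2 * length + 1).toNat - (length.toNat + 1) = length.toNat := by omega
      simp only [h0, List.nil_append, hB1, hB2, hn1, hn2, if_pos hsmall]
      simp [hle, not_lt.mpr hneg]
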